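-- pv_equiv track=rewrite | github.com/Emma-Leonhart/shintowiki-scripts | archive/german_ill.py | find_dewiki_title
-- ===== SOURCE A (Python) =====
-- def find_dewiki_title(num, named, parts):
--     # 1) named `de=…` wins
--     if "de" in named and named["de"].strip():
--         return named["de"].strip()
--
--     dewikis = []
--     # 2) numeric slot whose value == 'de' → next slot
--     for n in sorted(num):
--         if num[n] == "de" and (n+1) in num and num[n+1].strip():
--             dewikis.append(num[n+1].strip())
--
--     # 3) fallback: bare 'de' in parts → next part
--     for i,p in enumerate(parts):
--         if p == "de" and i+1 < len(parts):
--             dewikis.append(parts[i+1].strip())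
--
--     return dewikis[-1] if dewikis else None
-- ===== SOURCE B (Python) =====
-- def find_dewiki_title(num, named, parts):
--     # 1) named `de=…` wins
--     v = named.get("de", "")
--     if "de" in named and v.strip():
--         return v.strip()
--
--     # 2) fallback parts win over numeric slots: scan backwards, first hit is the answer
--     for i in range(len(parts) - 1, -1, -1):
--         if parts[i] == "de" and i + 1 < len(parts):
--             return parts[i + 1].strip()
--
--     # 3) numeric slots: the largest qualifying key decides
--     cands = [n for n in num if num[n] == "de" and n + 1 in num and num[n + 1].strip()]
--     if cands:
--         return num[max(cands) + 1].strip()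
--     return None
-- ===== Notes on version B (the rewrite author's own statement) =====
-- stated objective: simpler
-- what changed: B drops the sort and the accumulate-then-take-last list: it scans parts backwards and returns on the first hit, and otherwise takes a plain max over the qualifying numeric keys instead of sorting all keys and collecting every candidate.
import Mathlib
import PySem

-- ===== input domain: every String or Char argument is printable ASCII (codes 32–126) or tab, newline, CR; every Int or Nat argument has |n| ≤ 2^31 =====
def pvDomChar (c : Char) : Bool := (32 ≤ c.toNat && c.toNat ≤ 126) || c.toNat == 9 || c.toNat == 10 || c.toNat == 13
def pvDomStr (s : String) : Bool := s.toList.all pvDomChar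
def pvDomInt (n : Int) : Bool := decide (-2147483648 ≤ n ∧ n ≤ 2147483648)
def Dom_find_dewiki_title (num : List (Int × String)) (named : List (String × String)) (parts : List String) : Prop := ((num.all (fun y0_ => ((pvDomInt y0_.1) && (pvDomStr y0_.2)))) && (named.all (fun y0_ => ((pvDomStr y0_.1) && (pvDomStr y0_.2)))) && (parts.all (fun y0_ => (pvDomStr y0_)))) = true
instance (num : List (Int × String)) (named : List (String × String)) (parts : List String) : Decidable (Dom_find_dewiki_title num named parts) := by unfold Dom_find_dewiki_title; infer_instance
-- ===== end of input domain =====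

-- B replaces A's sort + accumulate-then-take-last by a backward scan of `parts` with early
-- return and, failing that, a plain max over the qualifying numeric keys (simpler, no sort).

-- ===== PORT A =====
def find_dewiki_title (num : List (Int × String)) (named : List (String × String)) (parts : List String) : Option String :=
  -- the dict arguments arrive as association lists; build the Python dicts
  let namedD := PySem.Dict.ofList named
  -- 1) named `de=…` wins
  if namedD.contains "de" && (PySem.Str.strip (namedD.getD "de" "") != "") then
    some (PySem.Str.strip (namedD.getD "de" ""))
  else
    let numD := PySem.Dict.ofList num
    -- 2) numeric slot whose value == 'de' → next slot
    let dewikis : List String :=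
      (PySem.List.sorted numD.keys (fun x => x) false).foldl (fun acc n =>
        if numD.getD n "" == "de" && numD.contains (n + 1)
            && (PySem.Str.strip (numD.getD (n + 1) "") != "") then
          acc ++ [PySem.Str.strip (numD.getD (n + 1) "")]
        else acc) []
    -- 3) fallback: bare 'de' in parts → next part
    let dewikis :=
      (PySem.List.enumerate parts 0).foldl (fun acc ip =>
        if ip.2 == "de" && ip.1 + 1 < PySem.List.len parts then
          acc ++ [PySem.Str.strip (PySem.List.pyGetD parts (ip.1 + 1) "")]
        else acc) dewikis
    -- dewikis[-1] if dewikis else None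
    dewikis.getLast?

-- ===== PORT B =====
-- backward scan: for i in range(len(parts)-1, -1, -1): if parts[i]=="de" and i+1<len(parts): return parts[i+1].strip()
def pvScanBack (parts : List String) : Nat → Option String
  | 0 => none
  | k + 1 =>
    if parts.getD k "" == "de" && k + 1 < parts.length then
      some (PySem.Str.strip (parts.getD (k + 1) ""))
    else pvScanBack parts k

def find_dewiki_title_alt (num : List (Int × String)) (named : List (String × String)) (parts : List String) : Option String :=
  let namedD := PySem.Dict.ofList named
  if namedD.contains "de" && (PySem.Str.strip (namedD.getD "de" "") != "") then
    some (PySem.Str.strip (namedD.getD "de" ""))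
  else
    match pvScanBack parts parts.length with
    | some v => some v
    | none =>
      let numD := PySem.Dict.ofList num
      let cands := numD.keys.filter (fun n =>
        numD.getD n "" == "de" && numD.contains (n + 1)
          && (PySem.Str.strip (numD.getD (n + 1) "") != ""))
      match PySem.List.max? cands (fun x => x) with
      | some m => some (PySem.Str.strip (numD.getD (m + 1) ""))
      | none => none

-- ===== PRECONDITION & SPEC =====
def Spec_find_dewiki_title (num : List (Int × String)) (named : List (String × String)) (parts : List String) (out : Option String) : Prop := out = find_dewiki_title_alt num named parts
instance (num : List (Int × String)) (named : List (String × String)) (parts : List String) (out : Option String) : Decidable (Spec_find_dewiki_title num named parts out) := by unfold Spec_find_dewiki_title; infer_instance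

-- ===== CLAIM (what is proved, stated in full; the proofs are below) =====
def Claim_equal_find_dewiki_title : Prop := ∀ (num : List (Int × String)) (named : List (String × String)) (parts : List String), Dom_find_dewiki_title num named parts → Spec_find_dewiki_title num named parts (find_dewiki_title num named parts)

-- ===== LEMMAS AND PROOFS =====

-- in a (· ≤ ·)-pairwise list the last element bounds every element
theorem pv_le_of_getLast?_pairwise {l : List Int} (h : l.Pairwise (· ≤ ·)) {m : Int}
    (hm : l.getLast? = some m) : ∀ y ∈ l, y ≤ m := by
  induction l with
  | nil => simp at hm
  | cons a t ih =>
    intro y hy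
    cases t with
    | nil => simp at hm; simp [List.mem_singleton.mp hy, hm]
    | cons b u =>
      rw [List.getLast?_cons_cons] at hm
      rcases List.mem_cons.mp hy with rfl | hy'
      · have hmmem : m ∈ b :: u := List.mem_of_getLast? hm
        exact List.rel_of_pairwise_cons h hmmem
      · exact ih (List.Pairwise.of_cons h) hm y hy'

-- the last element of an ascending arrangement of `cands` is Python's max(cands)
theorem pv_getLast?_eq_max? {S cands : List Int} (hperm : S.Perm cands)
    (hp : S.Pairwise (· ≤ ·)) :
    S.getLast? = PySem.List.max? cands (fun x => x) := by
  cases hS : S.getLast? with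
  | none =>
    have : S = [] := List.getLast?_eq_none_iff.mp hS
    subst this
    have hc : cands = [] := hperm.symm.eq_nil
    subst hc
    exact ((PySem.List.max?_eq_none_iff [] _).mpr rfl).symm
  | some m =>
    cases hC : PySem.List.max? cands (fun x => x) with
    | none =>
      have : cands = [] := (PySem.List.max?_eq_none_iff _ _).mp hC
      subst this
      have : S = [] := hperm.eq_nil
      simp [this] at hS
    | some m' =>
      have hmS : m ∈ S := List.mem_of_getLast? hS
      have h1 : m ≤ m' := PySem.List.max?_isMax hC m (hperm.mem_iff.mp hmS)
      have hm'S : m' ∈ S := hperm.mem_iff.mpr (PySem.List.max?_mem hC)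
      have h2 : m' ≤ m := pv_le_of_getLast?_pairwise hp hS m' hm'S
      exact congrArg some (le_antisymm h1 h2)

-- the backward scan is the last element of A's forward parts collection
theorem pv_scanBack_take (parts : List String) (k : Nat) (hk : k ≤ parts.length) :
    pvScanBack parts k =
    ((((PySem.List.enumerate parts 0).take k).filter
        (fun ip => ip.2 == "de" && decide (ip.1 + 1 < PySem.List.len parts))).map
      (fun ip => PySem.Str.strip (PySem.List.pyGetD parts (ip.1 + 1) ""))).getLast? := by
  induction k with
  | zero => simp [pvScanBack]
  | succ k ih =>
    have hkl : k < parts.length := by omega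
    have htake : (PySem.List.enumerate parts 0).take (k + 1)
        = (PySem.List.enumerate parts 0).take k ++ [((k : Int), parts[k])] := by
      rw [List.take_add_one, PySem.List.getElem?_enumerate]
      simp [List.getElem?_eq_getElem hkl]
    rw [pvScanBack, htake, List.filter_append, List.map_append]
    have hgd : parts.getD k "" = parts[k] := List.getD_eq_getElem parts "" hkl
    have hcast : ((k : Int) + 1) = ((k + 1 : Nat) : Int) := by push_cast; ring
    by_cases hde : parts[k] = "de"
    · by_cases hb : k + 1 < parts.length
      · rw [if_pos (by rw [hgd]; simp [hde, hb])]
        have hf : List.filter (fun ip => ip.2 == "de" && decide (ip.1 + 1 < PySem.List.len parts))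
            [((k : Int), parts[k])] = [((k : Int), parts[k])] := by simp [hde]; omega
        rw [hf]
        simp only [List.map_cons, List.map_nil]
        rw [List.getLast?_concat, hcast, PySem.List.pyGetD_natCast]
      · rw [if_neg (by rw [hgd]; simp [hb])]
        have hf : List.filter (fun ip => ip.2 == "de" && decide (ip.1 + 1 < PySem.List.len parts))
            [((k : Int), parts[k])] = [] := by simp [hde]; omega
        rw [hf]
        simp only [List.map_nil, List.append_nil]
        exact ih (by omega)
    · rw [if_neg (by rw [hgd]; simp [hde])]
      have hf : List.filter (fun ip => ip.2 == "de" && decide (ip.1 + 1 < PySem.List.len parts))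
          [((k : Int), parts[k])] = [] := by simp [hde]
      rw [hf]
      simp only [List.map_nil, List.append_nil]
      exact ih (by omega)

-- the num-side collection's last element is map of max over the unsorted qualifying keys
theorem pv_num_last (keys : List Int) (pN : Int → Bool) (fN : Int → String) :
    (((PySem.List.sorted keys (fun x => x) false).filter pN).map fN).getLast?
      = (PySem.List.max? (keys.filter pN) (fun x => x)).map fN := by
  rw [List.getLast?_map]
  congr 1
  exact pv_getLast?_eq_max?
    ((PySem.List.sorted_perm keys (fun x => x) false).filter pN)
    ((PySem.List.sorted_pairwise keys (fun x => x)).filter pN)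

-- ===== VERDICT (by name: the statement is the Claim_ definition above) =====
theorem find_dewiki_title_spec : Claim_equal_find_dewiki_title := by
  intro num named parts _
  unfold Spec_find_dewiki_title find_dewiki_title find_dewiki_title_alt
  simp only []
  by_cases hg : ((PySem.Dict.ofList named).contains "de"
      && (PySem.Str.strip ((PySem.Dict.ofList named).getD "de" "") != "")) = true
  · rw [if_pos hg, if_pos hg]
  · rw [if_neg hg, if_neg hg]
    have hparts : pvScanBack parts parts.length =
        (((PySem.List.enumerate parts 0).filter
            (fun ip => ip.2 == "de" && decide (ip.1 + 1 < PySem.List.len parts))).map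
          (fun ip => PySem.Str.strip (PySem.List.pyGetD parts (ip.1 + 1) ""))).getLast? := by
      have := pv_scanBack_take parts parts.length (le_refl _)
      rwa [List.take_of_length_le (by rw [PySem.List.length_enumerate])] at this
    rw [PySem.List.foldl_append_if, PySem.List.foldl_append_if, List.nil_append,
      List.getLast?_append, ← hparts, pv_num_last]
    cases pvScanBack parts parts.length with
    | some v => simp
    | none =>
      cases PySem.List.max? ((PySem.Dict.ofList num).keys.filter _) (fun x => x) with
      | some m => simp
      | none => simp
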